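-- pv_equiv track=rewrite | github.com/MrMafora/Snap_Lotto | coverage_optimizer.py | _generate_greedy_wheel
-- ===== SOURCE A (Python) =====
-- from typing import Dict, List, Tuple, Any, Set
-- from itertools import combinations, product
--
-- def _generate_greedy_wheel(pool: List[int], picks: int, max_lines: int) -> List[List[int]]:
--     """Generate wheel using greedy algorithm to maximize coverage"""
--     if len(pool) < picks:
--         return []
--
--     wheel_lines = []
--     covered_combinations = set()
--
--     # Generate all possible 3-number combinations from pool (our target)
--     target_combinations = list(combinations(pool, 3))
--
--     # Greedy selection: pick lines that cover the most uncovered 3-combinations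
--     while len(wheel_lines) < max_lines and len(covered_combinations) < len(target_combinations):
--         best_line = None
--         best_coverage = 0
--
--         # Try different line combinations
--         for line_combo in combinations(pool, picks):
--             line_3_combos = set(combinations(line_combo, 3))
--             new_coverage = len(line_3_combos - covered_combinations)
--
--             if new_coverage > best_coverage:
--                 best_coverage = new_coverage
--                 best_line = list(line_combo)
--
--         if best_line and best_coverage > 0:
--             wheel_lines.append(best_line)
--             # Update covered combinations
--             line_3_combos = set(combinations(best_line, 3))
--             covered_combinations.update(line_3_combos)
--         else:
--             break  # No more improvement possible
--
--     return wheel_lines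
-- ===== SOURCE B (Python) =====
-- from itertools import combinations
--
-- def _generate_greedy_wheel(pool, picks, max_lines):
--     """Greedy wheel, but each candidate line's 3-combo set is built ONCE and its
--     marginal coverage is maintained incrementally instead of rescanned from scratch."""
--     if len(pool) < picks:
--         return []
--
--     target_count = len(list(combinations(pool, 3)))
--
--     # Precompute candidates: (line, its 3-combo set, current uncovered count)
--     cands = []
--     for combo in combinations(pool, picks):
--         s = set(combinations(combo, 3))
--         cands.append((list(combo), s, len(s)))
--
--     covered = set()
--     wheel_lines = []
--     while len(wheel_lines) < max_lines and len(covered) < target_count: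
--         best = None
--         best_cov = 0
--         for cand in cands:
--             if best_cov < cand[2]:
--                 best = cand
--                 best_cov = cand[2]
--         if best is None or best_cov == 0:
--             break
--         line, s, _ = best
--         new = s - covered
--         covered |= new
--         wheel_lines.append(line)
--         # Incremental update: subtract each candidate's overlap with the newly covered triples
--         cands = [(l, t, c - len(t & new)) for (l, t, c) in cands]
--     return wheel_lines
-- ===== Notes on version B (the rewrite author's own statement) =====
-- stated objective: alternative
-- what changed: B builds each candidate line's 3-combination set once up front and maintains every candidate's marginal coverage as a stored counter updated incrementally (decremented by its overlap with the newly covered triples) instead of A's per-round regeneration of every candidate's 3-combo set and full set-difference rescan.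
-- outside the precondition, e.g. on _generate_greedy_wheel([0, 1], -1, -1): A returns [], B raises ValueError
import Mathlib
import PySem

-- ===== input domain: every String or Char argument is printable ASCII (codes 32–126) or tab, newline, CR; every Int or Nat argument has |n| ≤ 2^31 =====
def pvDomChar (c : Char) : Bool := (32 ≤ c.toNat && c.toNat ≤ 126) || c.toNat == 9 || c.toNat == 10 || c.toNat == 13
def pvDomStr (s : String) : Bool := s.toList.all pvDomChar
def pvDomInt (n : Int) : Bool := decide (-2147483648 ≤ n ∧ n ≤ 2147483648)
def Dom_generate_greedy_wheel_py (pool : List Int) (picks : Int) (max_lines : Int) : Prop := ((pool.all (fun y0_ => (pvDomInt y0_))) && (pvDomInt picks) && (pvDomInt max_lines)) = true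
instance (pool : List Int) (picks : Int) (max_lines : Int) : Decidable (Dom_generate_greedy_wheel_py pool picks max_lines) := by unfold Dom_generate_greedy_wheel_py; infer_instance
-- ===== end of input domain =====

-- B precomputes each candidate line's 3-combo set once and maintains each candidate's
-- marginal coverage incrementally (decrement by overlap with newly covered triples)
-- instead of A's per-round rebuild of every candidate's combo set and full set difference.

-- itertools.combinations(xs, k) in Python's (lexicographic-by-index) order; shared helper of both ports
def pyCombinations : Nat → List Int → List (List Int)
  | 0, _ => [[]]
  | _ + 1, [] => []
  | k + 1, x :: xs => (pyCombinations k xs).map (fun c => x :: c) ++ pyCombinations (k + 1) xs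

-- ===== PORT A =====
-- the inner 'for line_combo in combinations(pool, picks)' scan: (best_line, best_coverage)
def pvAScan (cov : PySem.Set (List Int)) (cands : List (List Int)) : Option (List Int) × Int :=
  cands.foldl (fun st combo =>
    let line3 := PySem.Set.ofList (pyCombinations 3 combo)
    let nc := PySem.Set.len (PySem.Set.diff line3 cov)
    if st.2 < nc then (some combo, nc) else st) (none, 0)

-- the while loop; fuel = max_lines - len(wheel_lines) (the loop appends one line per iteration)
def pvALoop (cands : List (List Int)) (tlen : Nat) :
    Nat → PySem.Set (List Int) → List (List Int) → List (List Int)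
  | 0, _, acc => acc
  | f + 1, cov, acc =>
    if PySem.Set.len cov < (tlen : Int) then
      let r := pvAScan cov cands
      match r.1 with
      | some bl =>
        if bl ≠ [] ∧ 0 < r.2 then
          pvALoop cands tlen f
            (PySem.Set.union cov (PySem.Set.ofList (pyCombinations 3 bl))) (acc ++ [bl])
        else acc
      | none => acc
    else acc

def generate_greedy_wheel_py (pool : List Int) (picks : Int) (max_lines : Int) : List (List Int) :=
  if (pool.length : Int) < picks then []
  else
    let target := pyCombinations 3 pool
    pvALoop (pyCombinations picks.toNat pool) target.length max_lines.toNat PySem.Set.empty []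

-- ===== PORT B =====
-- the inner scan over precomputed candidates: (best candidate, best_cov)
def pvBScan (cands : List (List Int × PySem.Set (List Int) × Int)) :
    Option (List Int × PySem.Set (List Int) × Int) × Int :=
  cands.foldl (fun st cand => if st.2 < cand.2.2 then (some cand, cand.2.2) else st) (none, 0)

def pvBLoop (tlen : Nat) :
    Nat → List (List Int × PySem.Set (List Int) × Int) → PySem.Set (List Int) →
    List (List Int) → List (List Int)
  | 0, _, _, acc => acc
  | f + 1, cands, cov, acc =>
    if PySem.Set.len cov < (tlen : Int) then
      let r := pvBScan cands
      match r.1 with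
      | some best =>
        if r.2 = 0 then acc
        else
          let newT := PySem.Set.diff best.2.1 cov
          pvBLoop tlen f
            (cands.map (fun p => (p.1, p.2.1, p.2.2 - PySem.Set.len (PySem.Set.inter p.2.1 newT))))
            (PySem.Set.union cov newT) (acc ++ [best.1])
      | none => acc
    else acc

def generate_greedy_wheel_py_alt (pool : List Int) (picks : Int) (max_lines : Int) : List (List Int) :=
  if (pool.length : Int) < picks then []
  else
    let tlen := (pyCombinations 3 pool).length
    let cands := (pyCombinations picks.toNat pool).map (fun c =>
      let s := PySem.Set.ofList (pyCombinations 3 c)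
      (c, s, PySem.Set.len s))
    pvBLoop tlen max_lines.toNat cands PySem.Set.empty []

-- ===== PRECONDITION & SPEC =====
-- Pre_ excludes negative picks: there combinations(pool, picks) raises ValueError in A whenever its greedy
-- loop body runs (and A returns [] only when the loop never runs), and B's eager precomputation always raises.
def Pre_generate_greedy_wheel_py (_pool : List Int) (picks : Int) (_max_lines : Int) : Prop :=
  0 ≤ picks
instance (pool : List Int) (picks : Int) (max_lines : Int) : Decidable (Pre_generate_greedy_wheel_py pool picks max_lines) := by unfold Pre_generate_greedy_wheel_py; infer_instance

def pvWitness_generate_greedy_wheel_py : List Int × Int × Int := ([1, 2, 3, 4], 3, 2)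

def Spec_generate_greedy_wheel_py (pool : List Int) (picks : Int) (max_lines : Int) (out : List (List Int)) : Prop := out = generate_greedy_wheel_py_alt pool picks max_lines
instance (pool : List Int) (picks : Int) (max_lines : Int) (out : List (List Int)) : Decidable (Spec_generate_greedy_wheel_py pool picks max_lines out) := by unfold Spec_generate_greedy_wheel_py; infer_instance

-- ===== CLAIM (what is proved, stated in full; the proofs are below) =====
def Claim_equal_generate_greedy_wheel_py : Prop := ∀ (pool : List Int) (picks : Int) (max_lines : Int), Dom_generate_greedy_wheel_py pool picks max_lines → Pre_generate_greedy_wheel_py pool picks max_lines → Spec_generate_greedy_wheel_py pool picks max_lines (generate_greedy_wheel_py pool picks max_lines)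

-- ===== LEMMAS AND PROOFS =====

-- the B-side triple a candidate line denotes once `cov` triples are covered
def pvEnrich (cov : PySem.Set (List Int)) (l : List Int) : List Int × PySem.Set (List Int) × Int :=
  (l, PySem.Set.ofList (pyCombinations 3 l),
    PySem.Set.len (PySem.Set.diff (PySem.Set.ofList (pyCombinations 3 l)) cov))

-- A's scan step, named so the fold can be reasoned about with an arbitrary initial state
def pvAStep (cov : PySem.Set (List Int)) (st : Option (List Int) × Int) (combo : List Int) :
    Option (List Int) × Int :=
  let line3 := PySem.Set.ofList (pyCombinations 3 combo)
  let nc := PySem.Set.len (PySem.Set.diff line3 cov)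
  if st.2 < nc then (some combo, nc) else st

lemma pvAScan_eq_foldl (cov : PySem.Set (List Int)) (L : List (List Int)) :
    pvAScan cov L = L.foldl (pvAStep cov) (none, 0) := rfl

-- B's scan of the enriched candidates computes A's scan (best line enriched, same coverage)
lemma pvScan_rel (cov : PySem.Set (List Int)) :
    forall (L : List (List Int)) (st : Option (List Int) × Int),
      (L.map (pvEnrich cov)).foldl
          (fun st cand => if st.2 < cand.2.2 then (some cand, cand.2.2) else st)
          (st.1.map (pvEnrich cov), st.2)
        = ((L.foldl (pvAStep cov) st).1.map (pvEnrich cov), (L.foldl (pvAStep cov) st).2)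
  | [], _ => rfl
  | x :: xs, st => by
    simp only [List.map_cons, List.foldl_cons, pvAStep]
    by_cases h : st.2 < PySem.Set.len (PySem.Set.diff (PySem.Set.ofList (pyCombinations 3 x)) cov)
    · simp only [pvEnrich, h, if_pos]
      exact pvScan_rel cov xs (some x, _)
    · simp only [pvEnrich, h, if_false]
      exact pvScan_rel cov xs st

lemma pvFilter_split {A : Type} (p q : A -> Bool) :
    forall (t : List A), (forall x, x ∈ t -> q x = true -> p x = true) ->
      (t.filter fun x => p x && !q x).length + (t.filter q).length = (t.filter p).length
  | [], _ => rfl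
  | x :: t, h => by
    have ih := pvFilter_split p q t (fun y hy => h y (List.mem_cons_of_mem _ hy))
    cases hp : p x <;> cases hq : q x <;> simp_all <;> omega

lemma pvContains_eq (s : PySem.Set (List Int)) (y : List Int) :
    PySem.Set.contains s y = decide (y ∈ s) := by
  rw [Bool.eq_iff_iff]; simp

-- |t \ (cov ∪ newT)| = |t \ cov| - |t ∩ newT| when newT is disjoint from cov
lemma pvLen_diff_union (t cov newT : List (List Int)) (h : forall x, x ∈ newT -> x ∉ cov) :
    PySem.Set.len (PySem.Set.diff t (PySem.Set.union cov newT))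
      = PySem.Set.len (PySem.Set.diff t cov) - PySem.Set.len (PySem.Set.inter t newT) := by
  simp only [PySem.Set.diff, PySem.Set.inter, PySem.Set.len]
  have e1 : (t.filter fun x => !PySem.Set.contains (PySem.Set.union cov newT) x)
      = t.filter fun x => (!PySem.Set.contains cov x) && !(PySem.Set.contains newT x) := by
    apply List.filter_congr
    intro x _
    simp [PySem.Set.mem_union]
  have e2 := pvFilter_split (fun x => !PySem.Set.contains cov x)
    (fun x => PySem.Set.contains newT x) t
    (by intro x _ hq; simp only [pvContains_eq, decide_eq_true_eq] at *; simpa using h x hq)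
  rw [e1]
  push_cast [← e2]
  ring

lemma pvFoldl_add_filter :
    forall (s : List (List Int)) (acc cov : PySem.Set (List Int)),
      (forall x, x ∈ cov -> x ∈ acc) ->
      (s.filter fun x => !PySem.Set.contains cov x).foldl PySem.Set.add acc
        = s.foldl PySem.Set.add acc
  | [], _, _, _ => rfl
  | x :: s, acc, cov, h => by
    by_cases hx : x ∈ cov
    · have hc : PySem.Set.contains cov x = true := by simp [hx]
      have ha : PySem.Set.add acc x = acc := PySem.Set.add_of_mem (h x hx)
      simp only [List.filter_cons, hc, Bool.not_true, List.foldl_cons, ha]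
      exact pvFoldl_add_filter s acc cov h
    · have hc : PySem.Set.contains cov x = false := by simp [hx]
      simp only [List.filter_cons, hc, Bool.not_false, List.foldl_cons]
      exact pvFoldl_add_filter s (PySem.Set.add acc x) cov
        (fun y hy => by rw [PySem.Set.mem_add]; exact Or.inl (h y hy))

-- cov ∪ (s \ cov) = cov ∪ s  (as insertion-ordered lists)
lemma pvUnion_diff (cov s : List (List Int)) :
    PySem.Set.union cov (PySem.Set.diff s cov) = PySem.Set.union cov s := by
  simp only [PySem.Set.union, PySem.Set.update, PySem.Set.diff]
  exact pvFoldl_add_filter s cov cov (fun x h => h)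

-- invariant of A's scan: best_coverage stays nonnegative, and a selected best line is nonempty
lemma pvScan_inv (cov : PySem.Set (List Int)) :
    forall (L : List (List Int)) (st : Option (List Int) × Int),
      0 ≤ st.2 -> (0 < st.2 -> forall b, st.1 = some b -> b ≠ []) ->
      0 ≤ (L.foldl (pvAStep cov) st).2 ∧
        (0 < (L.foldl (pvAStep cov) st).2 ->
          forall b, (L.foldl (pvAStep cov) st).1 = some b -> b ≠ [])
  | [], st, h1, h2 => ⟨h1, h2⟩
  | x :: xs, st, h1, h2 => by
    simp only [List.foldl_cons, pvAStep]
    by_cases h : st.2 < PySem.Set.len (PySem.Set.diff (PySem.Set.ofList (pyCombinations 3 x)) cov)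
    · simp only [h, if_pos]
      refine pvScan_inv cov xs _ (le_of_lt (lt_of_le_of_lt h1 h)) ?_
      intro hpos b hb hbnil
      cases hb
      subst hbnil
      simp [PySem.Set.len, PySem.Set.diff, pyCombinations, PySem.Set.ofList] at hpos
    · simp only [h, if_false]
      exact pvScan_inv cov xs st h1 h2

lemma pvLoop_rel (tlen : Nat) (L : List (List Int)) :
    forall (f : Nat) (cov : PySem.Set (List Int)) (acc : List (List Int)),
      pvBLoop tlen f (L.map (pvEnrich cov)) cov acc = pvALoop L tlen f cov acc
  | 0, cov, acc => rfl
  | f + 1, cov, acc => by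
    simp only [pvBLoop, pvALoop, pvBScan, pvAScan_eq_foldl]
    by_cases hlt : PySem.Set.len cov < (tlen : Int)
    · simp only [hlt, if_pos]
      have hs := pvScan_rel cov L (none, 0)
      simp only [Option.map_none] at hs
      rw [hs]
      rcases hr : (L.foldl (pvAStep cov) (none, 0)).1 with _ | bl
      · simp
      · have hinv := pvScan_inv cov L (none, 0) le_rfl (by intro h b hb; cases hb)
        simp only [Option.map_some]
        by_cases h0 : (L.foldl (pvAStep cov) (none, 0)).2 = 0
        · simp [h0]
        · have hpos : 0 < (L.foldl (pvAStep cov) (none, 0)).2 := lt_of_le_of_ne hinv.1 (Ne.symm h0)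
          have hnil : bl ≠ [] := hinv.2 hpos bl hr
          have hcond : bl ≠ [] ∧ 0 < (L.foldl (pvAStep cov) (none, 0)).2 := ⟨hnil, hpos⟩
          simp only [pvEnrich]
          rw [if_neg h0, if_pos hcond]
          rw [pvUnion_diff cov (PySem.Set.ofList (pyCombinations 3 bl))]
          rw [← pvLoop_rel tlen L f
            (PySem.Set.union cov (PySem.Set.ofList (pyCombinations 3 bl))) (acc ++ [bl])]
          congr 1
          rw [List.map_map]
          apply List.map_congr_left
          intro l _
          simp only [Function.comp_apply, pvEnrich]
          rw [← pvUnion_diff cov (PySem.Set.ofList (pyCombinations 3 bl)),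
            pvLen_diff_union _ cov _ (fun x hx => ((PySem.Set.mem_diff _ _ _).mp hx).2)]
    · have h2 : ¬ List.length cov < tlen := by
        simp only [PySem.Set.len] at hlt
        exact_mod_cast hlt
      simp [h2]

-- ===== VERDICT (by name: the statement is the Claim_ definition above) =====
theorem generate_greedy_wheel_py_spec : Claim_equal_generate_greedy_wheel_py := by
  intro pool picks max_lines _ _
  unfold Spec_generate_greedy_wheel_py generate_greedy_wheel_py generate_greedy_wheel_py_alt
  split
  · rfl
  · have h := pvLoop_rel (pyCombinations 3 pool).length (pyCombinations picks.toNat pool)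
      max_lines.toNat PySem.Set.empty []
    rw [← h]
    congr 1
    simp [pvEnrich, PySem.Set.diff, PySem.Set.empty, PySem.Set.len]
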